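-- pv_equiv track=rewrite | github.com/ARN14/gdpr-information-and-password-manager | gdpr_mask.py | replace_with_stars
-- ===== SOURCE A (Python) =====
-- def replace_with_stars(text):
--     replaced_string = ""
--
--     for char in text:
--         if char == " ":
--             replaced_string += " "
--         else:
--             replaced_string += "*"
--
--     return replaced_string
-- ===== SOURCE B (Python) =====
-- def replace_with_stars(text):
--     return " ".join("*" * len(word) for word in text.split(" "))
-- ===== Notes on version B (the rewrite author's own statement) =====
-- stated objective: idiomatic
-- what changed: Instead of a per-character accumulator loop with a branch on each char, B splits the text on spaces, replaces each chunk by a star-run of the same length built with string repetition, and rejoins with spaces; no per-character test or string accumulator remains.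
import Mathlib
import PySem

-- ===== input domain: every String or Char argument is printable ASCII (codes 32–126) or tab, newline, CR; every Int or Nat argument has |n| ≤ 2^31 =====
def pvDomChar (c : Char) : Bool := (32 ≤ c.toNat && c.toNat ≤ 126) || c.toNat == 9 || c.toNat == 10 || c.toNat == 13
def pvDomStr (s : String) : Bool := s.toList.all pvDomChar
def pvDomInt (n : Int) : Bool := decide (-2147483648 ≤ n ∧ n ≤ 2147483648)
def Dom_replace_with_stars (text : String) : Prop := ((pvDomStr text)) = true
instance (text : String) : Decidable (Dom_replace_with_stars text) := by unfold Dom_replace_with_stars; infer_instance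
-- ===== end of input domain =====

-- B replaces A's per-character accumulator loop by split-on-space / star-each-chunk / rejoin; idiomatic; bulk string ops instead of per-char appends.

-- ===== PORT A =====
-- literal transliteration: build the result by appending " " or "*" per character
def replace_with_stars (text : String) : String :=
  text.toList.foldl
    (fun replaced_string char =>
      if char == ' ' then replaced_string ++ " " else replaced_string ++ "*")
    ""

-- ===== PORT B =====
-- " ".join("*" * len(word) for word in text.split(" "))
def replace_with_stars_alt (text : String) : String :=
  PySem.Str.join " "
    ((PySem.Chars.splitOn text.toList " ".toList).map
      (fun word => String.ofList (List.replicate word.length '*')))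

-- ===== PRECONDITION & SPEC =====
def Spec_replace_with_stars (text : String) (out : String) : Prop := out = replace_with_stars_alt text
instance (text : String) (out : String) : Decidable (Spec_replace_with_stars text out) := by unfold Spec_replace_with_stars; infer_instance

-- ===== CLAIM (what is proved, stated in full; the proofs are below) =====
def Claim_equal_replace_with_stars : Prop := ∀ (text : String), Dom_replace_with_stars text → Spec_replace_with_stars text (replace_with_stars text)

-- ===== LEMMAS AND PROOFS =====

-- simple structural split-on-space, used only to characterise PySem.Chars.splitOn
def spChunks : List Char → List (List Char)
  | [] => [[]]
  | c :: t => if c = ' ' then [] :: spChunks t else (spChunks t).modifyHead (c :: ·)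

theorem spChunks_ne_nil (l : List Char) : spChunks l ≠ [] := by
  induction l with
  | nil => simp [spChunks]
  | cons c t ih =>
    simp only [spChunks]
    split_ifs
    · simp
    · cases h : spChunks t with
      | nil => exact absurd h ih
      | cons y ys => simp [List.modifyHead]

theorem go_eq (l : List Char) : ∀ (cur : List Char) (acc : List (List Char)),
    PySem.Chars.splitOn.go [' '] (l.length + 1) l cur acc
      = acc.reverse ++ (spChunks l).modifyHead (cur.reverse ++ ·) := by
  induction l with
  | nil => intro cur acc; simp [PySem.Chars.splitOn.go, spChunks, List.modifyHead]
  | cons c t ih =>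
    intro cur acc
    by_cases h : c = ' '
    · subst h
      simp only [List.length_cons]
      rw [PySem.Chars.splitOn.go]
      simp only [List.isPrefixOf, beq_self_eq_true, Bool.true_and,
        if_pos, List.length_cons, List.drop_succ_cons, List.drop_zero, List.length_nil]
      rw [ih]
      simp [spChunks, List.modifyHead, List.reverse_cons]
      cases spChunks t <;> rfl
    · simp only [List.length_cons]
      rw [PySem.Chars.splitOn.go]
      have hp : [' '].isPrefixOf (c :: t) = false := by
        simp [List.isPrefixOf]; exact fun hc => (h hc.symm).elim
      rw [hp]
      simp only [Bool.false_eq_true, if_false]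
      rw [ih]
      have hne := spChunks_ne_nil t
      cases hsp : spChunks t with
      | nil => exact absurd hsp hne
      | cons y ys =>
        simp [spChunks, h, hsp, List.modifyHead]

theorem splitOn_eq_spChunks (l : List Char) :
    PySem.Chars.splitOn l [' '] = spChunks l := by
  have := go_eq l [] []
  cases hsp : spChunks l with
  | nil => exact absurd hsp (spChunks_ne_nil l)
  | cons y ys =>
    simpa [PySem.Chars.splitOn, hsp, List.modifyHead] using this

theorem join_star (l : List Char) :
    PySem.Chars.join [' ']
        ((spChunks l).map (fun w => List.replicate w.length '*'))
      = l.map (fun c => if c == ' ' then c else '*') := by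
  induction l with
  | nil => simp [spChunks, PySem.Chars.join, List.intercalate]
  | cons c t ih =>
    cases hsp : spChunks t with
    | nil => exact absurd hsp (spChunks_ne_nil t)
    | cons y ys =>
      by_cases h : c = ' '
      · subst h
        rw [hsp] at ih
        simp only [spChunks, if_pos rfl, hsp, List.map_cons]
        rw [PySem.Chars.join] at *
        simpa [List.intercalate] using ih
      · rw [hsp] at ih
        simp only [spChunks, if_neg h, hsp, List.modifyHead, List.map_cons, List.length_cons,
          List.replicate, List.map_cons]
        rw [PySem.Chars.join] at *
        cases ys with
        | nil => simpa [List.intercalate, h] using ih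
        | cons z zs => simpa [List.intercalate, h] using ih

theorem rws_foldl_eq (l : List Char) (acc : String) :
    l.foldl (fun replaced_string char =>
      if char == ' ' then replaced_string ++ " " else replaced_string ++ "*") acc
    = acc ++ String.ofList (l.map (fun c => if c == ' ' then c else '*')) := by
  induction l generalizing acc with
  | nil => simp [String.ext_iff]
  | cons c rest ih =>
    simp only [List.foldl_cons, List.map_cons, ih]
    by_cases h : c = ' '
    · subst h; simp [String.ext_iff, String.toList_ofList]
    · simp [h, String.ext_iff]

-- ===== VERDICT (by name: the statement is the Claim_ definition above) =====
theorem replace_with_stars_spec : Claim_equal_replace_with_stars := by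
  intro text _
  unfold Spec_replace_with_stars replace_with_stars replace_with_stars_alt
  rw [rws_foldl_eq]
  apply String.ext
  simp only [String.toList_append, String.toList_ofList, PySem.Str.toList_join]
  rw [show (" ".toList) = [' '] from rfl, splitOn_eq_spChunks, ← join_star text.toList]
  simp [Function.comp_def, String.toList_ofList]
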